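-- pv_equiv track=rewrite | github.com/svtlvsh/crypto-23-24 | cp1/kandyla_fb-12_cp1/main.py | no_cross
-- ===== SOURCE A (Python) =====
-- def no_cross(text:str):
--     bigram_no_cross = {"total" : 0}
--     for i in range(0, len(text) - 1, 2):
--         pair = text[i: i+2]
--         if pair != '':
--             bigram_no_cross["total"] += 1
--             if pair not in bigram_no_cross:
--                 bigram_no_cross[pair] = 1
--             else:
--                 bigram_no_cross[pair] += 1
--     return bigram_no_cross
-- ===== SOURCE B (Python) =====
-- def no_cross(text: str):
--     n = len(text) // 2
--     pairs = [text[2*i:2*i+2] for i in range(n)]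
--     result = {"total": n}
--     for p in dict.fromkeys(pairs):
--         result[p] = pairs.count(p)
--     return result
-- ===== Notes on version B (the rewrite author's own statement) =====
-- stated objective: alternative
-- what changed: A makes one pass that increments the total and tallies each pair with a membership branch; B computes the total in closed form as len(text)//2, builds the pair list, deduplicates it with dict.fromkeys, and fills the result with one full pairs.count scan per distinct pair (staged per-key counting instead of an incremental tally).
import Mathlib
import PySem

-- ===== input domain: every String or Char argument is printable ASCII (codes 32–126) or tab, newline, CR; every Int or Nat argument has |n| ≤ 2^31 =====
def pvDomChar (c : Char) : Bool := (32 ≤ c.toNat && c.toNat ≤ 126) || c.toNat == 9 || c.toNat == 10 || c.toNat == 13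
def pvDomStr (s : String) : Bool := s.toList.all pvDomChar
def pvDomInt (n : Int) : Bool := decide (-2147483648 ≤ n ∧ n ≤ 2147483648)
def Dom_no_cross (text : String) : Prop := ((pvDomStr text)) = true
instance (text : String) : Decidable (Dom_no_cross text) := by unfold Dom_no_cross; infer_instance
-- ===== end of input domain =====

-- B replaces A's incremental tally loop by staged passes: closed-form total len//2, dedup of the
-- pair list via dict.fromkeys, then one pairs.count scan per distinct pair; objective: alternative.

-- ===== PORT A =====
def no_cross (text : String) : List (String × Int) :=
  ((PySem.List.pyRange 0 (PySem.Str.len text - 1) 2).foldl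
    (fun d i =>
      let pair := PySem.Str.slice text (some i) (some (i + 2))
      if pair ≠ "" then
        let d1 := d.modify "total" 0 (· + 1)
        if d1.contains pair = false then d1.insert pair 1
        else d1.modify pair 0 (· + 1)
      else d)
    (PySem.Dict.ofList [("total", (0 : Int))])).items

-- ===== PORT B =====
def no_cross_alt (text : String) : List (String × Int) :=
  let n : Int := PySem.Int.floordiv (PySem.Str.len text) 2
  let pairs := (List.range n.toNat).map
    (fun (i : Nat) => PySem.Str.slice text (some (2 * (i : Int))) (some (2 * (i : Int) + 2)))
  ((PySem.List.dedup pairs).foldl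
      (fun d p => d.insert p ((pairs.count p : Int)))
      (PySem.Dict.ofList [("total", n)])).items

-- ===== PRECONDITION & SPEC =====
def Spec_no_cross (text : String) (out : List (String × Int)) : Prop := out = no_cross_alt text
instance (text : String) (out : List (String × Int)) : Decidable (Spec_no_cross text out) := by unfold Spec_no_cross; infer_instance

-- ===== CLAIM (what is proved, stated in full; the proofs are below) =====
def Claim_equal_no_cross : Prop := ∀ (text : String), Dom_no_cross text → Spec_no_cross text (no_cross text)

-- ===== LEMMAS AND PROOFS =====

-- the non-overlapping 2-char chunks, proof-side only
def pairsOf : List Char → List String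
  | [] => []
  | [_] => []
  | a :: b :: r => String.ofList [a, b] :: pairsOf r

theorem length_pairsOf (cs : List Char) : (pairsOf cs).length = cs.length / 2 := by
  induction cs using pairsOf.induct with
  | case1 => simp [pairsOf]
  | case2 a => simp [pairsOf]
  | case3 a b r ih => simp [pairsOf, ih]; omega

-- both ports' pair lists are the chunk list
theorem pm (cs : List Char) :
    (List.range (cs.length / 2)).map (fun k => String.ofList ((cs.drop (2 * k)).take 2)) = pairsOf cs := by
  induction cs using pairsOf.induct with
  | case1 => simp [pairsOf]
  | case2 a => simp [pairsOf]
  | case3 a b r ih =>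
      have hcnt : (a :: b :: r).length / 2 = r.length / 2 + 1 := by
        simp only [List.length_cons]; omega
      rw [hcnt, List.range_succ_eq_map, List.map_cons, List.map_map]
      have : ∀ k : Nat, (a :: b :: r).drop (2 * Nat.succ k) = r.drop (2 * k) := by
        intro k
        have h2 : 2 * Nat.succ k = (2 * k) + 1 + 1 := by omega
        simp [h2]
      simp only [Function.comp_def, this]
      simp [pairsOf, ih]

theorem mem_pairsOf {cs : List Char} {p : String} (hp : p ∈ pairsOf cs) : p ≠ "" ∧ p ≠ "total" := by
  induction cs using pairsOf.induct with
  | case1 => simp [pairsOf] at hp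
  | case2 a => simp [pairsOf] at hp
  | case3 a b r ih =>
      simp only [pairsOf, List.mem_cons] at hp
      rcases hp with h | h
      · subst h
        constructor
        · intro h; have := congrArg String.toList h; simp at this
        · intro h; have := congrArg String.toList h; simp at this
      · exact ih h

theorem dict_insert_comm {κ ν : Type} [BEq κ] [LawfulBEq κ] (d : PySem.Dict κ ν) {k p : κ} (v w : ν)
    (hk : d.contains k = true) (hne : p ≠ k) :
    (d.insert p v).insert k w = (d.insert k w).insert p v := by
  have hbne : (p == k) = false := by simp [hne]
  have hkp : (d.insert p v).contains k = true := by
    rw [PySem.Dict.contains_insert]; simp [hk]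
  have hpk : (d.insert k w).contains p = d.contains p := by
    rw [PySem.Dict.contains_insert]; simp [hbne]
  have hfun : ∀ x : κ × ν,
      (fun q : κ × ν => if q.1 == k then (k, w) else q) ((fun q : κ × ν => if q.1 == p then (p, v) else q) x)
      = (fun q : κ × ν => if q.1 == p then (p, v) else q) ((fun q : κ × ν => if q.1 == k then (k, w) else q) x) := by
    intro x
    by_cases h1 : x.1 = p
    · simp [h1, hbne, hne, Ne.symm hne]
    · by_cases h2 : x.1 = k
      · simp [h1, h2, hbne, hne, Ne.symm hne]
      · simp [h1, h2]
  cases hcp : d.contains p with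
  | true =>
      apply PySem.Dict.ext
      rw [PySem.Dict.items_insert_of_contains _ _ hkp,
          PySem.Dict.items_insert_of_contains _ _ hcp,
          PySem.Dict.items_insert_of_contains _ _ (by rw [hpk]; exact hcp),
          PySem.Dict.items_insert_of_contains _ _ hk]
      rw [List.map_map, List.map_map]
      exact List.map_congr_left (fun x _ => hfun x)
  | false =>
      apply PySem.Dict.ext
      rw [PySem.Dict.items_insert_of_contains _ _ hkp,
          PySem.Dict.items_insert_of_not_contains _ _ hcp,
          PySem.Dict.items_insert_of_not_contains _ _ (by rw [hpk]; exact hcp),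
          PySem.Dict.items_insert_of_contains _ _ hk]
      rw [List.map_append]
      simp [hbne]

theorem dict_insert_getD_self {κ ν : Type} [BEq κ] [LawfulBEq κ] (d : PySem.Dict κ ν) (k : κ) (d0 : ν)
    (hnd : d.keys.Nodup) (hc : d.contains k = true) :
    d.insert k (d.getD k d0) = d := by
  apply PySem.Dict.ext
  rw [PySem.Dict.items_insert_of_contains _ _ hc]
  have : ∀ x ∈ d.items, (if x.1 == k then (k, d.getD k d0) else x) = x := by
    intro x hx
    by_cases h : x.1 = k
    · have hget : d.get? x.1 = some x.2 := by
        rw [PySem.Dict.get?_eq_some_iff_mem_items _ _ _ hnd]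
        exact hx
      have hv : d.getD k d0 = x.2 := by
        rw [← h]
        exact PySem.Dict.getD_of_get?_eq_some _ _ hget
      cases x
      simp_all
    · simp [h]
  rw [List.map_congr_left this]
  simp

theorem modify_eq {κ ν : Type} [BEq κ] (d : PySem.Dict κ ν) (k : κ) (d0 : ν) (f : ν → ν) :
    d.modify k d0 f = d.insert k (f (d.getD k d0)) := rfl

-- A's interleaved count+tally loop equals the plain tally fold from a pre-computed total
theorem fold_AB (ps : List String) : ∀ (d : PySem.Dict String Int),
    d.contains "total" = true → d.keys.Nodup → (∀ p ∈ ps, p ≠ "" ∧ p ≠ "total") →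
    ps.foldl (fun d pair =>
        if pair ≠ "" then
          let d1 := d.modify "total" 0 (· + 1)
          if d1.contains pair = false then d1.insert pair 1
          else d1.modify pair 0 (· + 1)
        else d) d
    = ps.foldl (fun d pair => d.insert pair (d.getD pair 0 + 1))
        (d.modify "total" 0 (· + (ps.length : Int))) := by
  induction ps with
  | nil =>
      intro d hc hnd _
      simp only [List.foldl_nil, List.length_nil, Nat.cast_zero]
      rw [modify_eq]
      simp only [add_zero]
      exact (dict_insert_getD_self d "total" 0 hnd hc).symm
  | cons p ps ih =>
      intro d hc hnd hmem
      have hp := hmem p (List.mem_cons_self)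
      have hmem' : ∀ q ∈ ps, q ≠ "" ∧ q ≠ "total" := fun q hq => hmem q (List.mem_cons_of_mem _ hq)
      have hd1c : (d.modify "total" 0 (· + 1)).contains "total" = true := by
        rw [PySem.Dict.contains_modify]; simp
      have hd1cp : (d.modify "total" 0 (· + 1)).contains p = d.contains p := by
        rw [PySem.Dict.contains_modify]; simp [hp.2]
      have hstep : (if p ≠ "" then
          let d1 := d.modify "total" 0 (· + 1)
          if d1.contains p = false then d1.insert p 1
          else d1.modify p 0 (· + 1)
        else d)
          = (d.modify "total" 0 (· + 1)).insert p (d.getD p 0 + 1) := by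
        rw [if_pos hp.1]
        by_cases hcp : d.contains p = true
        · rw [if_neg (by rw [hd1cp, hcp]; simp)]
          rw [modify_eq (d.modify "total" 0 (· + 1)) p 0]
          rw [PySem.Dict.getD_modify_of_ne _ _ _ hp.2]
        · rw [if_pos (by rw [hd1cp]; simpa using hcp)]
          have h0 : d.getD p 0 = 0 :=
            PySem.Dict.getD_of_not_contains _ _ (by simpa using hcp)
          rw [h0]
          norm_num
      simp only [List.foldl_cons, hstep]
      set E := (d.modify "total" 0 (· + 1)).insert p (d.getD p 0 + 1) with hE
      have hEc : E.contains "total" = true := by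
        rw [hE, PySem.Dict.contains_insert, hd1c]; simp
      have hEnd : E.keys.Nodup := by
        rw [hE, modify_eq]
        exact PySem.Dict.nodup_keys_insert _ _ _ (PySem.Dict.nodup_keys_insert _ _ _ hnd)
      rw [ih E hEc hEnd hmem']
      congr 1
      rw [modify_eq E, PySem.Dict.getD_insert_of_ne _ _ _ (Ne.symm hp.2),
          PySem.Dict.getD_modify_self, hE]
      rw [dict_insert_comm _ _ _ hd1c hp.2]
      rw [modify_eq d "total" 0 (· + 1), PySem.Dict.insert_insert_self]
      rw [modify_eq d "total" 0, PySem.Dict.getD_insert_of_ne _ _ _ hp.2]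
      have hlen : ((p :: ps).length : Int) = (ps.length : Int) + 1 := by
        simp only [List.length_cons]; push_cast; ring
      rw [hlen]
      congr 2
      ring

theorem dict_base_eq (c : Int) :
    (PySem.Dict.ofList [("total", (0:Int))]).modify "total" 0 (· + c) = PySem.Dict.ofList [("total", c)] := by
  apply PySem.Dict.ext
  simp [PySem.Dict.ofList, PySem.Dict.modify, PySem.Dict.insert, PySem.Dict.getD,
        PySem.Dict.get?, PySem.Dict.contains, PySem.Dict.update, PySem.Dict.empty]

theorem base_eq_insert (n : Int) :
    PySem.Dict.ofList [("total", n)] = (PySem.Dict.empty : PySem.Dict String Int).insert "total" n := rfl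

-- the tally fold's items: total first, then distinct pairs in first-appearance order with their counts
theorem tally_items (ps : List String) (n : Int) (hn : "total" ∉ ps) :
    (ps.foldl (fun d p => d.insert p (d.getD p 0 + 1)) (PySem.Dict.ofList [("total", n)])).items
      = ("total", n) :: (PySem.List.dedup ps).map (fun p => (p, (ps.count p : Int))) := by
  set base := PySem.Dict.ofList [("total", n)] with hbase
  set T := ps.foldl (fun d p => d.insert p (d.getD p 0 + 1)) base with hT
  have hbnd : base.keys.Nodup := by
    rw [hbase, base_eq_insert]
    exact PySem.Dict.nodup_keys_insert _ _ _ PySem.Dict.nodup_keys_empty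
  have hTnd : T.keys.Nodup := PySem.Dict.nodup_keys_foldl_insert ps _ base hbnd
  have hbkeys : base.keys = ["total"] := rfl
  have hkeys : T.keys = "total" :: PySem.List.dedup ps := by
    rw [hT, PySem.Dict.keys_foldl_insert, hbkeys, PySem.Set.update_eq_append_filter]
    have hfil : (PySem.Set.ofList ps).filter (fun y => !(PySem.Set.contains ["total"] y)) = PySem.Set.ofList ps := by
      apply List.filter_eq_self.mpr
      intro y hy
      have hyps : y ∈ ps := (PySem.Set.mem_ofList _ _).mp hy
      have : y ≠ "total" := fun h => hn (h ▸ hyps)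
      simp [PySem.Set.contains, this]
    rw [hfil]
    simp [PySem.List.dedup_eq_ofList]
  have hgetD : ∀ k, T.getD k 0 = base.getD k 0 + (ps.count k : Int) := by
    intro k
    rw [hT]
    exact PySem.Dict.getD_foldl_insert_add_one ps base k
  rw [PySem.Dict.items_eq_map_keys T hTnd 0, hkeys, List.map_cons]
  have htot : T.getD "total" 0 = n := by
    rw [hgetD, hbase, base_eq_insert, PySem.Dict.getD_insert_self,
        List.count_eq_zero.mpr hn]
    simp
  rw [htot]
  congr 1
  apply List.map_congr_left
  intro k hk
  have hkps : k ∈ ps := (PySem.List.mem_dedup _ _).mp hk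
  have hkne : k ≠ "total" := fun h => hn (h ▸ hkps)
  have hb0 : base.getD k 0 = 0 := by
    rw [hbase, base_eq_insert, PySem.Dict.getD_insert_of_ne _ _ _ hkne]
    simp [PySem.Dict.getD_empty]
  rw [hgetD, hb0, zero_add]

-- B's fresh-key insert loop appends exactly the same items
theorem alt_items (ps : List String) (n : Int) (hn : "total" ∉ ps) :
    ((PySem.List.dedup ps).foldl (fun d p => d.insert p ((ps.count p : Int)))
        (PySem.Dict.ofList [("total", n)])).items
      = ("total", n) :: (PySem.List.dedup ps).map (fun p => (p, (ps.count p : Int))) := by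
  have hfresh : ∀ p ∈ PySem.List.dedup ps,
      (PySem.Dict.ofList [("total", n)]).contains ((fun a => a) p) = false := by
    intro p hp
    have hps : p ∈ ps := (PySem.List.mem_dedup _ _).mp hp
    have hne : p ≠ "total" := fun h => hn (h ▸ hps)
    rw [base_eq_insert, PySem.Dict.contains_insert]
    simp [hne, PySem.Dict.contains_empty]
  have hnd : ((PySem.List.dedup ps).map (fun a => a)).Nodup := by
    simpa using PySem.List.nodup_dedup ps
  have := PySem.Dict.items_foldl_insert_fresh (PySem.List.dedup ps)
      (fun a => a) (fun a => (ps.count a : Int)) (PySem.Dict.ofList [("total", n)]) hfresh hnd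
  simpa using this

theorem hpairA (text : String) (k : Nat) :
    PySem.Str.slice text (some (0 + 2*(k:Int))) (some (0 + 2*(k:Int) + 2))
      = String.ofList ((text.toList.drop (2*k)).take 2) := by
  rw [PySem.Str.slice, PySem.Chars.slice_eq_listSlice,
      PySem.List.slice_toNat text.toList (by omega) (by omega)]
  congr 3 <;> omega

theorem hpairB (text : String) (k : Nat) :
    PySem.Str.slice text (some (2*(k:Int))) (some (2*(k:Int) + 2))
      = String.ofList ((text.toList.drop (2*k)).take 2) := by
  rw [PySem.Str.slice, PySem.Chars.slice_eq_listSlice,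
      PySem.List.slice_toNat text.toList (by omega) (by omega)]
  congr 3 <;> omega

theorem no_cross_spec' (text : String) : no_cross text = no_cross_alt text := by
  unfold no_cross no_cross_alt
  have hflo : PySem.Int.floordiv (PySem.Str.len text) 2 = ((text.toList.length / 2 : Nat) : Int) := by
    rw [PySem.Str.len_eq]
    exact_mod_cast PySem.Int.floordiv_natCast text.toList.length 2
  have hlen : PySem.Str.len text = (text.toList.length : Int) := PySem.Str.len_eq text
  -- A side: reduce the range-fold to a fold over the chunk list pairsOf
  rw [hlen, PySem.List.pyRange_of_pos 0 ((text.toList.length : Int) - 1) (by norm_num)]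
  have hcnt : (if (0:Int) < (text.toList.length : Int) - 1 then (((text.toList.length : Int) - 1 - 0 + 2 - 1)/2).toNat else 0) = text.toList.length / 2 := by
    split <;> omega
  rw [hcnt, List.foldl_map]
  simp only [hpairA]
  have hA : (List.range (text.toList.length / 2)).foldl
      (fun (d : PySem.Dict String Int) k =>
        if String.ofList ((text.toList.drop (2*k)).take 2) ≠ "" then
          let d1 := d.modify "total" 0 (· + 1)
          if d1.contains (String.ofList ((text.toList.drop (2*k)).take 2)) = false
          then d1.insert (String.ofList ((text.toList.drop (2*k)).take 2)) 1
          else d1.modify (String.ofList ((text.toList.drop (2*k)).take 2)) 0 (· + 1)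
        else d)
      (PySem.Dict.ofList [("total", (0:Int))])
    = (pairsOf text.toList).foldl
      (fun (d : PySem.Dict String Int) pair =>
        if pair ≠ "" then
          let d1 := d.modify "total" 0 (· + 1)
          if d1.contains pair = false then d1.insert pair 1
          else d1.modify pair 0 (· + 1)
        else d)
      (PySem.Dict.ofList [("total", (0:Int))]) := by
    rw [← pm text.toList, List.foldl_map]
  rw [hA]
  rw [fold_AB (pairsOf text.toList) _ (by decide) (by decide) (fun p hp => mem_pairsOf hp)]
  rw [length_pairsOf, dict_base_eq]
  -- B side: the pair list is the same chunk list
  have hflo2 : PySem.Int.floordiv ((text.toList.length : Int)) 2 = ((text.toList.length / 2 : Nat) : Int) := by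
    exact_mod_cast PySem.Int.floordiv_natCast text.toList.length 2
  rw [hflo2]
  have htn : (((text.toList.length / 2 : Nat) : Int)).toNat = text.toList.length / 2 := by
    omega
  rw [htn]
  simp only [hpairB]
  rw [pm]
  have hntot : "total" ∉ pairsOf text.toList := fun h => (mem_pairsOf h).2 rfl
  rw [tally_items _ _ hntot, alt_items _ _ hntot]

-- ===== VERDICT (by name: the statement is the Claim_ definition above) =====
theorem no_cross_spec : Claim_equal_no_cross := by
  intro text _
  unfold Spec_no_cross
  exact no_cross_spec' text
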